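-- pv_equiv track=rewrite | github.com/vvasseur/pqsigRM | find_U_UV.py | apply_swaps
-- ===== SOURCE A (Python) =====
-- def apply_swaps(permutation, swaps):
--     permutation_swapped = permutation[:]
--     k = len(swaps)
--     for i in range(0, len(permutation), 2 * k):
--         for j in range(k):
--             if swaps[j]:
--                 permutation_swapped[i + j], permutation_swapped[i + j + k] = (
--                     permutation_swapped[i + j + k],
--                     permutation_swapped[i + j],
--                 )
--     return permutation_swapped
-- ===== SOURCE B (Python) =====
-- def apply_swaps(permutation, swaps):
--     k = len(swaps)
--     n = len(permutation)
--     result = []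
--     for p in range(n):
--         j = p % (2 * k)
--         if j < k and swaps[j]:
--             result.append(permutation[p + k])
--         elif j >= k and swaps[j - k]:
--             result.append(permutation[p - k])
--         else:
--             result.append(permutation[p])
--     return result
-- ===== Notes on version B (the rewrite author's own statement) =====
-- stated objective: alternative
-- what changed: B replaces A's in-place pairwise swapping over blocks by a single positional gather pass: for each output index p it computes p mod 2k in closed form and reads the source element directly, building the result front-to-back without any mutation.
import Mathlib
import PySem

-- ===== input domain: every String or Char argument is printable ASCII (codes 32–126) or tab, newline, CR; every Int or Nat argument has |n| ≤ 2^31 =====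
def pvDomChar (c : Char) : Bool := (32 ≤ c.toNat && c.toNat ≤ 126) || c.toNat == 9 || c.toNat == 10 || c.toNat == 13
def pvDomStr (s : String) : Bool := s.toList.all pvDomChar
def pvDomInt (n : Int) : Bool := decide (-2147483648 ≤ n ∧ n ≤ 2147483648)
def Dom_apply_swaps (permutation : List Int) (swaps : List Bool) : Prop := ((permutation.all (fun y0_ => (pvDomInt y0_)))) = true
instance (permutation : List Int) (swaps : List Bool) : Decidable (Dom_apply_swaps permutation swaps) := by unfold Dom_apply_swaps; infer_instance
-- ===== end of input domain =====

-- B replaces A's in-place block-pairwise swapping by a single positional gather pass over the output indices (same O(n) cost, no mutation).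


-- ===== PORT A =====
-- Literal transliteration of A: copy is the fold's initial state; nested loops over block
-- starts i (range step 2k) and j < k, swapping positions i+j and i+j+k when swaps[j].
-- All indices the loops produce are nonnegative and, inside Pre_, in range, so
-- pyGetD / List.set / .toNat are exact there.
def apply_swaps (permutation : List Int) (swaps : List Bool) : List Int :=
  let k : Int := swaps.length
  (PySem.List.pyRange 0 permutation.length (2 * k)).foldl (fun ps i =>
    (PySem.List.pyRange 0 k 1).foldl (fun ps2 j =>
      if PySem.List.pyGetD swaps j false = true then
        let x := PySem.List.pyGetD ps2 (i + j + k) 0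
        let y := PySem.List.pyGetD ps2 (i + j) 0
        (ps2.set (i + j).toNat x).set (i + j + k).toNat y
      else ps2) ps) permutation

-- ===== PORT B =====
-- Literal transliteration of B: one pass over p in range(n); j = p % (2*k) decides whether
-- the output element is read from p+k, p-k or p.
def apply_swaps_alt (permutation : List Int) (swaps : List Bool) : List Int :=
  let k : Int := swaps.length
  let n : Int := permutation.length
  (PySem.List.pyRange 0 n 1).map (fun p =>
    let j := PySem.Int.mod p (2 * k)
    if j < k ∧ PySem.List.pyGetD swaps j false = true then
      PySem.List.pyGetD permutation (p + k) 0
    else if k ≤ j ∧ PySem.List.pyGetD swaps (j - k) false = true then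
      PySem.List.pyGetD permutation (p - k) 0
    else
      PySem.List.pyGetD permutation p 0)


-- ===== PRECONDITION & SPEC =====
-- Pre_ excludes exactly the inputs on which the Python A raises: swaps = [] (range step 0,
-- ValueError) and inputs whose trailing partial block would read a true-swap index
-- i+j+k ≥ len(permutation) (IndexError); A returns normally on every other input.
def Pre_apply_swaps (permutation : List Int) (swaps : List Bool) : Prop :=
  swaps ≠ [] ∧ ∀ j < swaps.length, swaps.getD j false = true →
    (permutation.length % (2 * swaps.length) = 0 ∨
     j + swaps.length < permutation.length % (2 * swaps.length))
instance (permutation : List Int) (swaps : List Bool) : Decidable (Pre_apply_swaps permutation swaps) := by unfold Pre_apply_swaps; infer_instance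

def pvWitness_apply_swaps : List Int × List Bool := ([3, 1, 4, 1], [true, false])

def Spec_apply_swaps (permutation : List Int) (swaps : List Bool) (out : List Int) : Prop := out = apply_swaps_alt permutation swaps
instance (permutation : List Int) (swaps : List Bool) (out : List Int) : Decidable (Spec_apply_swaps permutation swaps out) := by unfold Spec_apply_swaps; infer_instance

-- ===== CLAIM (what is proved, stated in full; the proofs are below) =====
def Claim_equal_apply_swaps : Prop := ∀ (permutation : List Int) (swaps : List Bool), Dom_apply_swaps permutation swaps → Pre_apply_swaps permutation swaps → Spec_apply_swaps permutation swaps (apply_swaps permutation swaps)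

-- ===== LEMMAS AND PROOFS =====

def innerFold (sw : List Bool) (i : Int) (a : Int) (l : List Int) : List Int :=
  (PySem.List.pyRange a sw.length 1).foldl (fun ps2 j =>
    if PySem.List.pyGetD sw j false = true then
      let x := PySem.List.pyGetD ps2 (i + j + sw.length) 0
      let y := PySem.List.pyGetD ps2 (i + j) 0
      (ps2.set (i + j).toNat x).set (i + j + sw.length).toNat y
    else ps2) l

def gv (perm : List Int) (sw : List Bool) (p : Nat) : Int :=
  if p % (2 * sw.length) < sw.length ∧ sw.getD (p % (2 * sw.length)) false = true then
    perm.getD (p + sw.length) 0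
  else if sw.length ≤ p % (2 * sw.length) ∧ sw.getD (p % (2 * sw.length) - sw.length) false = true then
    perm.getD (p - sw.length) 0
  else perm.getD p 0

def outerFold (perm : List Int) (sw : List Bool) (c : Nat) : List Int :=
  (List.range c).foldl (fun l c' => innerFold sw ((c' * (2 * sw.length) : Nat) : Int) ((0 : Nat) : Int) l) perm

def bval (sw : List Bool) (i a : Nat) (l : List Int) (p : Nat) : Int :=
  if i + a ≤ p ∧ p < i + sw.length ∧ sw.getD (p - i) false = true then
    l.getD (p + sw.length) 0
  else if i + sw.length + a ≤ p ∧ p < i + 2 * sw.length ∧ sw.getD (p - (i + sw.length)) false = true then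
    l.getD (p - sw.length) 0
  else l.getD p 0

lemma getD_set_self (l : List Int) (x : Nat) (v : Int) (h : x < l.length) : (l.set x v).getD x 0 = v := by
  simp [List.getD, h]

lemma getD_set_ne (l : List Int) (x q : Nat) (v : Int) (h : q ≠ x) : (l.set x v).getD q 0 = l.getD q 0 := by
  simp [List.getD, List.getElem?_set, Ne.symm h]

lemma getD_swap (l : List Int) (x y q : Nat) (u v : Int) (hx : x < l.length) (hy : y < l.length)
    (hxy : x ≠ y) :
    ((l.set x u).set y v).getD q 0 = if q = y then v else if q = x then u else l.getD q 0 := by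
  rcases eq_or_ne q y with rfl | h1
  · rw [getD_set_self _ _ _ (by simpa using hy), if_pos rfl]
  · rw [getD_set_ne _ _ _ _ h1, if_neg h1]
    rcases eq_or_ne q x with rfl | h2
    · rw [getD_set_self _ _ _ hx, if_pos rfl]
    · rw [getD_set_ne _ _ _ _ h2, if_neg h2]

lemma bval_step_false (sw : List Bool) (i a : Nat) (l : List Int) (ha : a < sw.length)
    (h : sw.getD a false = false) (p : Nat) :
    bval sw i (a + 1) l p = bval sw i a l p := by
  have key1 : (i + (a + 1) ≤ p ∧ p < i + sw.length ∧ sw.getD (p - i) false = true) ↔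
      (i + a ≤ p ∧ p < i + sw.length ∧ sw.getD (p - i) false = true) := by
    constructor
    · rintro ⟨h1, h2, h3⟩; exact ⟨by omega, h2, h3⟩
    · rintro ⟨h1, h2, h3⟩
      refine ⟨?_, h2, h3⟩
      rcases eq_or_ne p (i + a) with rfl | hne
      · rw [show i + a - i = a by omega, h] at h3; cases h3
      · omega
  have key2 : (i + sw.length + (a + 1) ≤ p ∧ p < i + 2 * sw.length ∧ sw.getD (p - (i + sw.length)) false = true) ↔
      (i + sw.length + a ≤ p ∧ p < i + 2 * sw.length ∧ sw.getD (p - (i + sw.length)) false = true) := by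
    constructor
    · rintro ⟨h1, h2, h3⟩; exact ⟨by omega, h2, h3⟩
    · rintro ⟨h1, h2, h3⟩
      refine ⟨?_, h2, h3⟩
      rcases eq_or_ne p (i + sw.length + a) with rfl | hne
      · rw [show i + sw.length + a - (i + sw.length) = a by omega, h] at h3; cases h3
      · omega
  unfold bval
  simp only [key1, key2]

lemma bval_step_true (sw : List Bool) (i a : Nat) (l : List Int) (ha : a < sw.length)
    (h : sw.getD a false = true) (hr : i + a + sw.length < l.length) (p : Nat) :
    bval sw i (a + 1)
      ((l.set (i + a) (l.getD (i + a + sw.length) 0)).set (i + a + sw.length) (l.getD (i + a) 0)) p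
    = bval sw i a l p := by
  have hswap : ∀ q : Nat, ((l.set (i + a) (l.getD (i + a + sw.length) 0)).set (i + a + sw.length) (l.getD (i + a) 0)).getD q 0
      = if q = i + a + sw.length then l.getD (i + a) 0 else if q = i + a then l.getD (i + a + sw.length) 0 else l.getD q 0 :=
    fun q => getD_swap l _ _ q _ _ (by omega) hr (by omega)
  unfold bval
  by_cases c1 : i + a + 1 ≤ p ∧ p < i + sw.length ∧ sw.getD (p - i) false = true
  · rw [if_pos (show i + (a + 1) ≤ p ∧ p < i + sw.length ∧ sw.getD (p - i) false = true from ⟨by omega, c1.2.1, c1.2.2⟩),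
        if_pos (show i + a ≤ p ∧ p < i + sw.length ∧ sw.getD (p - i) false = true from ⟨by omega, c1.2.1, c1.2.2⟩),
        hswap (p + sw.length), if_neg (show ¬(p + sw.length = i + a + sw.length) by omega),
        if_neg (show ¬(p + sw.length = i + a) by omega)]
  · by_cases c2 : i + sw.length + a + 1 ≤ p ∧ p < i + 2 * sw.length ∧ sw.getD (p - (i + sw.length)) false = true
    · rw [if_neg (show ¬(i + (a + 1) ≤ p ∧ p < i + sw.length ∧ sw.getD (p - i) false = true) by
            rintro ⟨u1, u2, u3⟩; omega),
          if_pos (show i + sw.length + (a + 1) ≤ p ∧ p < i + 2 * sw.length ∧ sw.getD (p - (i + sw.length)) false = true from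
            ⟨by omega, c2.2.1, c2.2.2⟩),
          if_neg (show ¬(i + a ≤ p ∧ p < i + sw.length ∧ sw.getD (p - i) false = true) by
            rintro ⟨u1, u2, u3⟩; omega),
          if_pos (show i + sw.length + a ≤ p ∧ p < i + 2 * sw.length ∧ sw.getD (p - (i + sw.length)) false = true from
            ⟨by omega, c2.2.1, c2.2.2⟩),
          hswap (p - sw.length), if_neg (show ¬(p - sw.length = i + a + sw.length) by omega),
          if_neg (show ¬(p - sw.length = i + a) by omega)]
    · rw [if_neg (show ¬(i + (a + 1) ≤ p ∧ p < i + sw.length ∧ sw.getD (p - i) false = true) by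
            rintro ⟨u1, u2, u3⟩; exact c1 ⟨by omega, u2, u3⟩),
          if_neg (show ¬(i + sw.length + (a + 1) ≤ p ∧ p < i + 2 * sw.length ∧ sw.getD (p - (i + sw.length)) false = true) by
            rintro ⟨u1, u2, u3⟩; exact c2 ⟨by omega, u2, u3⟩),
          hswap p]
      rcases eq_or_ne p (i + a) with rfl | hpa
      · rw [if_neg (show ¬(i + a = i + a + sw.length) by omega), if_pos rfl,
            if_pos (show i + a ≤ i + a ∧ i + a < i + sw.length ∧ sw.getD (i + a - i) false = true from
              ⟨le_refl _, by omega, by rw [show i + a - i = a by omega]; exact h⟩)]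
      · rcases eq_or_ne p (i + a + sw.length) with rfl | hpb
        · rw [if_pos rfl,
              if_neg (show ¬(i + a ≤ i + a + sw.length ∧ i + a + sw.length < i + sw.length ∧
                sw.getD (i + a + sw.length - i) false = true) by rintro ⟨u1, u2, u3⟩; omega),
              if_pos (show i + sw.length + a ≤ i + a + sw.length ∧ i + a + sw.length < i + 2 * sw.length ∧
                sw.getD (i + a + sw.length - (i + sw.length)) false = true from
                ⟨by omega, by omega, by rw [show i + a + sw.length - (i + sw.length) = a by omega]; exact h⟩),
              show i + a + sw.length - sw.length = i + a by omega]
        · rw [if_neg hpb, if_neg hpa,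
              if_neg (show ¬(i + a ≤ p ∧ p < i + sw.length ∧ sw.getD (p - i) false = true) by
                rintro ⟨u1, u2, u3⟩; exact c1 ⟨by omega, u2, u3⟩),
              if_neg (show ¬(i + sw.length + a ≤ p ∧ p < i + 2 * sw.length ∧ sw.getD (p - (i + sw.length)) false = true) by
                rintro ⟨u1, u2, u3⟩; exact c2 ⟨by omega, u2, u3⟩)]

lemma inner_char (sw : List Bool) (i : Nat) :
    ∀ (d a : Nat), sw.length ≤ a + d → ∀ l : List Int,
    (∀ j, a ≤ j → j < sw.length → sw.getD j false = true → i + j + sw.length < l.length) →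
    (innerFold sw i a l).length = l.length ∧
    ∀ p, (innerFold sw i a l).getD p 0 = bval sw i a l p := by
  intro d
  induction d with
  | zero =>
    intro a hle l _
    rw [innerFold, PySem.List.pyRange_one_eq_nil (by exact_mod_cast hle)]
    refine ⟨rfl, fun p => ?_⟩
    unfold bval
    rw [if_neg (by rintro ⟨u1, u2, u3⟩; omega), if_neg (by rintro ⟨u1, u2, u3⟩; omega)]
    rfl
  | succ d ih =>
    intro a hle l hrange
    by_cases hak : sw.length ≤ a
    · rw [innerFold, PySem.List.pyRange_one_eq_nil (by exact_mod_cast hak)]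
      refine ⟨rfl, fun p => ?_⟩
      unfold bval
      rw [if_neg (by rintro ⟨u1, u2, u3⟩; omega), if_neg (by rintro ⟨u1, u2, u3⟩; omega)]
      rfl
    · replace hak : a < sw.length := by omega
      rw [innerFold, PySem.List.pyRange_one_cons (by exact_mod_cast hak), List.foldl_cons]
      have hcast : ((a : Int) + 1) = ((a + 1 : Nat) : Int) := by push_cast; ring
      have hgets : PySem.List.pyGetD sw (a : Int) false = sw.getD a false := PySem.List.pyGetD_natCast sw a false
      by_cases hb : sw.getD a false = true
      · rw [hgets, if_pos hb]
        have e2 : ((i : Int) + (a : Int)) = ((i + a : Nat) : Int) := by push_cast; ring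
        have e1 : (((i + a : Nat) : Int) + (sw.length : Int)) = ((i + a + sw.length : Nat) : Int) := by push_cast; ring
        have hr := hrange a (le_refl a) hak hb
        simp only [e2, e1, PySem.List.pyGetD_natCast, Int.toNat_natCast]
        set l' := (l.set (i + a) (l.getD (i + a + sw.length) 0)).set (i + a + sw.length) (l.getD (i + a) 0) with hl'
        have hlen' : l'.length = l.length := by simp [hl']
        have hrange' : ∀ j, a + 1 ≤ j → j < sw.length → sw.getD j false = true → i + j + sw.length < l'.length := by
          intro j h1 h2 h3; rw [hlen']; exact hrange j (by omega) h2 h3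
        obtain ⟨ihlen, ihval⟩ := ih (a + 1) (by omega) l' hrange'
        rw [hcast]
        refine ⟨by rw [← innerFold, ihlen, hlen'], fun p => ?_⟩
        rw [← innerFold, ihval p, hl']
        exact bval_step_true sw i a l hak hb hr p
      · rw [hgets, if_neg hb]
        obtain ⟨ihlen, ihval⟩ := ih (a + 1) (by omega) l
          (fun j h1 h2 h3 => hrange j (by omega) h2 h3)
        rw [hcast]
        refine ⟨by rw [← innerFold, ihlen], fun p => ?_⟩
        rw [← innerFold, ihval p]
        exact bval_step_false sw i a l hak (by simpa using hb) p

lemma outer_inv (perm : List Int) (sw : List Bool) (hk : 0 < sw.length)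
    (hpre : ∀ j, j < sw.length → sw.getD j false = true →
      (perm.length % (2 * sw.length) = 0 ∨ j + sw.length < perm.length % (2 * sw.length))) :
    ∀ c : Nat, (c = 0 ∨ (c - 1) * (2 * sw.length) < perm.length) →
    (outerFold perm sw c).length = perm.length ∧
    ∀ p, (outerFold perm sw c).getD p 0 =
      if p < c * (2 * sw.length) ∧ p < perm.length then gv perm sw p else perm.getD p 0 := by
  intro c
  induction c with
  | zero =>
    intro _
    refine ⟨rfl, fun p => ?_⟩
    rw [if_neg (by rintro ⟨u1, _⟩; omega)]
    rfl
  | succ c ihc =>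
    intro hc
    have hcn : c * (2 * sw.length) < perm.length := by simpa using hc.resolve_left (by omega)
    have ihcond : c = 0 ∨ (c - 1) * (2 * sw.length) < perm.length := by
      rcases Nat.eq_zero_or_pos c with rfl | hcpos
      · exact Or.inl rfl
      · exact Or.inr (lt_of_le_of_lt (Nat.mul_le_mul_right _ (by omega)) hcn)
    obtain ⟨ihlen, ihval⟩ := ihc ihcond
    have hstep : outerFold perm sw (c + 1) =
        innerFold sw ((c * (2 * sw.length) : Nat) : Int) ((0 : Nat) : Int) (outerFold perm sw c) := by
      rw [outerFold, List.range_succ, List.foldl_append, List.foldl_cons, List.foldl_nil, ← outerFold]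
    obtain ⟨i, hi⟩ : ∃ i, c * (2 * sw.length) = i := ⟨_, rfl⟩
    simp only [hi] at hcn hstep ihval
    have hmul : (c + 1) * (2 * sw.length) = i + 2 * sw.length := by rw [Nat.succ_mul, hi]
    -- in-range condition for the inner block
    have hrange : ∀ j, 0 ≤ j → j < sw.length → sw.getD j false = true →
        i + j + sw.length < (outerFold perm sw c).length := by
      intro j _ hj hsw
      rw [ihlen]
      by_cases hfull : i + 2 * sw.length ≤ perm.length
      · omega
      · have hmod : perm.length % (2 * sw.length) = perm.length - i := by
          have h1 : perm.length = 2 * sw.length * c + (perm.length - i) := by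
            rw [Nat.mul_comm (2 * sw.length) c]; omega
          calc perm.length % (2 * sw.length)
              = (2 * sw.length * c + (perm.length - i)) % (2 * sw.length) := by rw [← h1]
            _ = (perm.length - i) % (2 * sw.length) := Nat.mul_add_mod (2 * sw.length) c _
            _ = perm.length - i := Nat.mod_eq_of_lt (by omega)
        rcases hpre j hj hsw with h0 | hlt
        · rw [hmod] at h0; omega
        · rw [hmod] at hlt; omega
    obtain ⟨blen, bval_eq⟩ := inner_char sw i sw.length 0 (by omega) (outerFold perm sw c) hrange
    rw [hstep]
    refine ⟨by rw [blen, ihlen], fun p => ?_⟩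
    rw [bval_eq p, hmul]
    -- mod characterization inside the block
    have hmodp : ∀ {q : Nat}, i ≤ q → q < i + 2 * sw.length → q % (2 * sw.length) = q - i := by
      intro q h1 h2
      have h3 : q = 2 * sw.length * c + (q - i) := by
        rw [Nat.mul_comm (2 * sw.length) c]; omega
      calc q % (2 * sw.length)
          = (2 * sw.length * c + (q - i)) % (2 * sw.length) := by rw [← h3]
        _ = (q - i) % (2 * sw.length) := Nat.mul_add_mod (2 * sw.length) c _
        _ = q - i := Nat.mod_eq_of_lt (by omega)
    by_cases hp1 : p < i
    · rw [bval, if_neg (by rintro ⟨u1, _⟩; omega), if_neg (by rintro ⟨u1, _⟩; omega), ihval p]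
      by_cases hpn : p < perm.length
      · rw [if_pos ⟨hp1, hpn⟩, if_pos ⟨by omega, hpn⟩]
      · rw [if_neg (by rintro ⟨_, u⟩; omega), if_neg (by rintro ⟨_, u⟩; omega)]
    · by_cases hp2 : p < i + 2 * sw.length
      · by_cases hpn : p < perm.length
        · have hj : p % (2 * sw.length) = p - i := hmodp (by omega) hp2
          rw [if_pos ⟨by omega, hpn⟩]
          by_cases b1 : p < i + sw.length ∧ sw.getD (p - i) false = true
          · rw [bval, if_pos ⟨by omega, b1.1, b1.2⟩, ihval (p + sw.length),
                if_neg (by rintro ⟨u1, _⟩; omega), gv, hj,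
                if_pos ⟨by omega, b1.2⟩]
          · by_cases b2 : i + sw.length ≤ p ∧ sw.getD (p - (i + sw.length)) false = true
            · rw [bval, if_neg (by rintro ⟨u1, u2, u3⟩; exact b1 ⟨u2, u3⟩),
                  if_pos ⟨by omega, hp2, b2.2⟩, ihval (p - sw.length),
                  if_neg (by rintro ⟨u1, _⟩; omega), gv, hj,
                  if_neg (by rintro ⟨u1, _⟩; omega),
                  if_pos ⟨by omega, by rw [show p - i - sw.length = p - (i + sw.length) by omega]; exact b2.2⟩]
            · rw [bval, if_neg (by rintro ⟨u1, u2, u3⟩; exact b1 ⟨u2, u3⟩),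
                  if_neg (by rintro ⟨u1, u2, u3⟩; exact b2 ⟨by omega, u3⟩),
                  ihval p, if_neg (by rintro ⟨u1, _⟩; omega), gv, hj,
                  if_neg (by rintro ⟨u1, u2⟩; exact b1 ⟨by omega, u2⟩),
                  if_neg (by rintro ⟨u1, u2⟩; refine b2 ⟨by omega, ?_⟩; rw [show p - (i + sw.length) = p - i - sw.length by omega]; exact u2)]
        · -- p ≥ perm.length : no branch of bval can fire (hrange), falls through
          have nof1 : ¬(i + 0 ≤ p ∧ p < i + sw.length ∧ sw.getD (p - i) false = true) := by
            rintro ⟨u1, u2, u3⟩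
            have := hrange (p - i) (by omega) (by omega) u3
            rw [ihlen] at this; omega
          have nof2 : ¬(i + sw.length + 0 ≤ p ∧ p < i + 2 * sw.length ∧ sw.getD (p - (i + sw.length)) false = true) := by
            rintro ⟨u1, u2, u3⟩
            have := hrange (p - (i + sw.length)) (by omega) (by omega) u3
            rw [ihlen] at this; omega
          rw [if_neg (by rintro ⟨_, u⟩; omega), bval, if_neg nof1, if_neg nof2,
              ihval p, if_neg (by rintro ⟨_, u⟩; omega)]
      · rw [if_neg (by rintro ⟨u1, _⟩; omega), bval,
            if_neg (by rintro ⟨u1, u2, _⟩; omega), if_neg (by rintro ⟨u1, u2, _⟩; omega),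
            ihval p, if_neg (by rintro ⟨u1, _⟩; omega)]

def nBlocks (perm : List Int) (sw : List Bool) : Nat :=
  if 0 < perm.length then (perm.length + 2 * sw.length - 1) / (2 * sw.length) else 0

lemma A_as_outer (perm : List Int) (sw : List Bool) (hk : 0 < sw.length) :
    apply_swaps perm sw = outerFold perm sw (nBlocks perm sw) := by
  have hbody : (fun (ps : List Int) (c : Nat) =>
      (PySem.List.pyRange 0 (sw.length : Int) 1).foldl (fun ps2 j =>
        if PySem.List.pyGetD sw j false = true then
          let x := PySem.List.pyGetD ps2 ((0 : Int) + 2 * (sw.length : Int) * (c : Int) + j + (sw.length : Int)) 0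
          let y := PySem.List.pyGetD ps2 ((0 : Int) + 2 * (sw.length : Int) * (c : Int) + j) 0
          (ps2.set ((0 : Int) + 2 * (sw.length : Int) * (c : Int) + j).toNat x).set
            ((0 : Int) + 2 * (sw.length : Int) * (c : Int) + j + (sw.length : Int)).toNat y
        else ps2) ps)
      = (fun (ps : List Int) (c : Nat) => innerFold sw ((c * (2 * sw.length) : Nat) : Int) ((0 : Nat) : Int) ps) := by
    funext ps c
    rw [innerFold, Nat.cast_zero]
    rw [show ((c * (2 * sw.length) : Nat) : Int) = (0 : Int) + 2 * (sw.length : Int) * (c : Int) by push_cast; ring]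
  have hcount : (if (0 : Int) < (perm.length : Int) then
      (((perm.length : Int) - 0 + 2 * (sw.length : Int) - 1) / (2 * (sw.length : Int))).toNat else 0)
      = nBlocks perm sw := by
    rw [nBlocks]
    by_cases hn : 0 < perm.length
    · rw [if_pos (by exact_mod_cast hn), if_pos hn]
      rw [show ((perm.length : Int) - 0 + 2 * (sw.length : Int) - 1) = ((perm.length + 2 * sw.length - 1 : Nat) : Int) by push_cast; omega]
      rw [show (2 * (sw.length : Int)) = ((2 * sw.length : Nat) : Int) by push_cast; ring]
      rw [← Int.natCast_ediv, Int.toNat_natCast]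
    · rw [if_neg (by exact_mod_cast hn), if_neg hn]
  show (PySem.List.pyRange 0 (perm.length : Int) (2 * (sw.length : Int))).foldl _ perm = _
  rw [PySem.List.pyRange_of_pos 0 (perm.length : Int) (by positivity), List.foldl_map]
  rw [outerFold]
  rw [hcount]
  exact congrFun (congrFun (congrArg _ hbody) perm) _

lemma B_point (perm : List Int) (sw : List Bool) (t : Nat) :
    (if PySem.Int.mod ((0 : Int) + (t : Int)) (2 * (sw.length : Int)) < (sw.length : Int) ∧
        PySem.List.pyGetD sw (PySem.Int.mod ((0 : Int) + (t : Int)) (2 * (sw.length : Int))) false = true then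
      PySem.List.pyGetD perm (((0 : Int) + (t : Int)) + (sw.length : Int)) 0
    else if (sw.length : Int) ≤ PySem.Int.mod ((0 : Int) + (t : Int)) (2 * (sw.length : Int)) ∧
        PySem.List.pyGetD sw (PySem.Int.mod ((0 : Int) + (t : Int)) (2 * (sw.length : Int)) - (sw.length : Int)) false = true then
      PySem.List.pyGetD perm (((0 : Int) + (t : Int)) - (sw.length : Int)) 0
    else PySem.List.pyGetD perm ((0 : Int) + (t : Int)) 0) = gv perm sw t := by
  have e0 : ((0 : Int) + (t : Int)) = ((t : Nat) : Int) := by push_cast; ring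
  have emod : PySem.Int.mod ((t : Nat) : Int) (2 * (sw.length : Int)) = ((t % (2 * sw.length) : Nat) : Int) := by
    rw [show (2 * (sw.length : Int)) = ((2 * sw.length : Nat) : Int) by push_cast; ring]
    exact PySem.Int.mod_natCast t (2 * sw.length)
  simp only [e0, emod, Nat.cast_lt, Nat.cast_le, PySem.List.pyGetD_natCast, gv]
  by_cases b1 : t % (2 * sw.length) < sw.length ∧ sw.getD (t % (2 * sw.length)) false = true
  · rw [if_pos b1, if_pos b1,
        show ((t : Int) + (sw.length : Int)) = ((t + sw.length : Nat) : Int) by push_cast; ring,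
        PySem.List.pyGetD_natCast]
  · rw [if_neg b1, if_neg b1]
    by_cases u1 : sw.length ≤ t % (2 * sw.length)
    · have hc : (((t % (2 * sw.length) : Nat) : Int) - (sw.length : Int)) = ((t % (2 * sw.length) - sw.length : Nat) : Int) :=
        (Nat.cast_sub u1).symm
      simp only [hc, PySem.List.pyGetD_natCast]
      by_cases b2 : sw.length ≤ t % (2 * sw.length) ∧ sw.getD (t % (2 * sw.length) - sw.length) false = true
      · have hts : sw.length ≤ t := le_trans u1 (Nat.mod_le _ _)
        rw [if_pos b2, if_pos b2,
            show ((t : Int) - (sw.length : Int)) = ((t - sw.length : Nat) : Int) by push_cast; omega,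
            PySem.List.pyGetD_natCast]
      · rw [if_neg b2, if_neg b2]
    · rw [if_neg (by rintro ⟨w1, _⟩; exact u1 w1), if_neg (by rintro ⟨w1, _⟩; exact u1 w1)]

lemma B_eq (perm : List Int) (sw : List Bool) :
    apply_swaps_alt perm sw = (List.range perm.length).map (gv perm sw) := by
  show (PySem.List.pyRange 0 (perm.length : Int) 1).map _ = _
  rw [PySem.List.pyRange_one, show ((perm.length : Int) - 0).toNat = perm.length by omega, List.map_map]
  refine List.map_congr_left ?_
  intro t _
  exact B_point perm sw t

lemma main_eq (perm : List Int) (sw : List Bool) (hk : 0 < sw.length)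
    (hpre : ∀ j, j < sw.length → sw.getD j false = true →
      (perm.length % (2 * sw.length) = 0 ∨ j + sw.length < perm.length % (2 * sw.length))) :
    apply_swaps perm sw = apply_swaps_alt perm sw := by
  rw [A_as_outer perm sw hk, B_eq perm sw]
  set m := nBlocks perm sw with hm
  have hK2 : 0 < 2 * sw.length := by omega
  have hfacts : (m = 0 ∨ (m - 1) * (2 * sw.length) < perm.length) ∧ perm.length ≤ m * (2 * sw.length) := by
    rw [hm, nBlocks]
    by_cases hn : 0 < perm.length
    · rw [if_pos hn]
      have hdm := Nat.div_add_mod (perm.length + 2 * sw.length - 1) (2 * sw.length)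
      have hr := Nat.mod_lt (perm.length + 2 * sw.length - 1) hK2
      set q := (perm.length + 2 * sw.length - 1) / (2 * sw.length) with hq
      have hq1 : q * (2 * sw.length) = 2 * sw.length * q := Nat.mul_comm _ _
      have hq2 : (q - 1) * (2 * sw.length) = 2 * sw.length * q - 2 * sw.length := by
        rw [Nat.sub_mul, one_mul, Nat.mul_comm q]
      constructor
      · right; rw [hq2]; omega
      · rw [hq1]; omega
    · rw [if_neg hn]; omega
  obtain ⟨hlen, hval⟩ := outer_inv perm sw hk hpre m hfacts.1
  apply List.ext_getElem
  · rw [hlen, List.length_map, List.length_range]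
  · intro p h1 h2
    have hp : p < perm.length := by rw [hlen] at h1; exact h1
    have := hval p
    rw [if_pos ⟨by have := hfacts.2; omega, hp⟩] at this
    rw [← List.getD_eq_getElem _ 0 h1, this]
    rw [List.getElem_map, List.getElem_range]

-- ===== VERDICT (by name: the statement is the Claim_ definition above) =====
theorem apply_swaps_spec : Claim_equal_apply_swaps := by
  intro permutation swaps _ hpre
  unfold Spec_apply_swaps
  exact main_eq permutation swaps (List.length_pos_iff.mpr hpre.1) hpre.2
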